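-- pv_equiv track=rewrite | github.com/wiktorlazarski/Macrogenerator | source/macrogenerator/macrogenerator.py | _extract_mname
-- ===== SOURCE A (Python) =====
-- def _extract_mname(text: str)->tuple:
--     '''Extract macrodefinition or macrocall name for further processing.
--
--         Parameters:
--         text (str): not already processed source text.
--
--         Returns:
--         tuple: containg macrodefinition name and offset, which represent number of character used while processing macrodefinition name.
--     '''
--     retv = ""
--
--     offset = 0
--     while True:
--         try:
--             char = text[offset]
--             offset += 1
--             if char.isspace():
--                 break
--             retv += char
--         except IndexError:
--             break
--
--     if not retv:
--         raise RuntimeError("ERROR: macroname unspecified")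
--     return (retv, offset)
-- ===== SOURCE B (Python) =====
-- def _extract_mname(text: str) -> tuple:
--     """Extract macro name: the prefix of text up to the first whitespace.
--
--     Offset is the number of characters consumed (name length, +1 if a
--     whitespace terminator was found)."""
--     for i, char in enumerate(text):
--         if char.isspace():
--             name, offset = text[:i], i + 1
--             break
--     else:
--         name, offset = text, len(text)
--     if not name:
--         raise RuntimeError("ERROR: macroname unspecified")
--     return (name, offset)
-- ===== Notes on version B (the rewrite author's own statement) =====
-- stated objective: simpler
-- what changed: B replaces A's unbounded while-loop that accumulates the name by repeated string concatenation under a try/except IndexError with a bounded for/else scan that only records the index of the first whitespace and slices the name out in one step.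
import Mathlib
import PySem

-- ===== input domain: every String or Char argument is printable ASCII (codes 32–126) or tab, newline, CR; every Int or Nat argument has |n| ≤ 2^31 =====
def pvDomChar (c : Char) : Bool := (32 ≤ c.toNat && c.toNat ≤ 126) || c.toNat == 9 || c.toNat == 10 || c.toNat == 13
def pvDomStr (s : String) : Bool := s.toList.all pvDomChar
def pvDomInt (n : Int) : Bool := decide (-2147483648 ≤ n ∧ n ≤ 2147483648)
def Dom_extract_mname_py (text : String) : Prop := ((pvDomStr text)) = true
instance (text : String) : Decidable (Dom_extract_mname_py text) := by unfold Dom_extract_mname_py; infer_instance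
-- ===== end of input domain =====

-- B replaces A's unbounded accumulate-and-catch-IndexError loop by a bounded for/else scan
-- that records the index of the first whitespace and slices the name out (objective: simpler).


-- ===== PORT A =====
-- A's while-True loop: index with offset, catch IndexError (= end of list), accumulate retv.
def extractMnameLoopA : List Char → List Char → Nat → (List Char × Nat)
  | [], retv, offset => (retv, offset)                    -- IndexError: break
  | c :: rest, retv, offset =>
      if PySem.Chars.isspace c then (retv, offset + 1)    -- whitespace: break (offset already +1)
      else extractMnameLoopA rest (retv ++ [c]) (offset + 1)

-- On inputs where the Python raises RuntimeError (empty name), the port returns ("", offset);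
-- those inputs are excluded by Pre_extract_mname_py.
def extract_mname_py (text : String) : String × Int :=
  let r := extractMnameLoopA text.toList [] 0
  (String.ofList r.1, (r.2 : Int))

-- ===== PORT B =====
-- B's for/else over enumerate(text): index of the first whitespace character, if any.
def extractMnameFindWS : List Char → Option Nat
  | [] => none
  | c :: rest => if PySem.Chars.isspace c then some 0 else (extractMnameFindWS rest).map (· + 1)

def extract_mname_py_alt (text : String) : String × Int :=
  match extractMnameFindWS text.toList with
  | some i => (String.ofList (text.toList.take i), ((i : Int) + 1))   -- text[:i], i+1
  | none => (text, (text.toList.length : Int))                    -- else branch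
  -- ('if not name: raise' — the raising inputs are excluded by Pre_extract_mname_py)

-- ===== PRECONDITION & SPEC =====
-- Pre_ excludes exactly the inputs on which A raises RuntimeError (empty macro name):
-- the empty string and strings starting with a whitespace character. B raises the same error there.
def Pre_extract_mname_py (text : String) : Prop :=
  (text.toList.head?.elim false (fun c => !PySem.Chars.isspace c)) = true
instance (text : String) : Decidable (Pre_extract_mname_py text) := by
  unfold Pre_extract_mname_py; infer_instance

def pvWitness_extract_mname_py : String := "abc def"

def Spec_extract_mname_py (text : String) (out : String × Int) : Prop := out = extract_mname_py_alt text
instance (text : String) (out : String × Int) : Decidable (Spec_extract_mname_py text out) := by unfold Spec_extract_mname_py; infer_instance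

-- ===== CLAIM (what is proved, stated in full; the proofs are below) =====
def Claim_equal_extract_mname_py : Prop := ∀ (text : String), Dom_extract_mname_py text → Pre_extract_mname_py text → Spec_extract_mname_py text (extract_mname_py text)

-- ===== LEMMAS AND PROOFS =====

theorem extractMnameLoopA_eq (chars : List Char) :
    ∀ (acc : List Char) (off : Nat),
    extractMnameLoopA chars acc off =
      match extractMnameFindWS chars with
      | some i => (acc ++ chars.take i, off + i + 1)
      | none => (acc ++ chars, off + chars.length) := by
  induction chars with
  | nil => intro acc off; simp [extractMnameLoopA, extractMnameFindWS]
  | cons c rest ih =>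
      intro acc off
      by_cases h : PySem.Chars.isspace c
      · simp [extractMnameLoopA, extractMnameFindWS, h]
      · simp only [extractMnameLoopA, extractMnameFindWS, h, ite_false,
          Bool.false_eq_true]
        rw [ih]
        cases hf : extractMnameFindWS rest with
        | none => simp [List.length_cons]; omega
        | some i => simp [List.take_succ_cons]; omega

-- ===== VERDICT (by name: the statement is the Claim_ definition above) =====
theorem extract_mname_py_spec : Claim_equal_extract_mname_py := by
  intro text _ _
  unfold Spec_extract_mname_py extract_mname_py extract_mname_py_alt
  rw [extractMnameLoopA_eq]
  cases hf : extractMnameFindWS text.toList with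
  | none => simp
  | some i => simp
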